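-- pv_equiv track=rewrite | github.com/pupydodo/Machine-Learning-Experiment | expe_1/id3_tree.py | _partition_by_feature
-- ===== SOURCE A (Python) =====
-- from typing import List, Dict, Any, Optional, Tuple
--
-- def _partition_by_feature(data: List[Dict[str,str]], labels: List[str], feature: str) -> Dict[str, Tuple]:
--     partitions = {}
--     for instance, label in zip(data, labels):
--         feature_value = instance[feature]
--         if feature_value not in partitions:
--             partitions[feature_value] = ([], [])
--         partitions[feature_value][0].append(instance)
--         partitions[feature_value][1].append(label)
--     return partitions
-- ===== SOURCE B (Python) =====
-- def _partition_by_feature(data, labels, feature):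
--     pairs = list(zip(data, labels))
--     keys = list(dict.fromkeys(inst[feature] for inst, _ in pairs))
--     return {v: ([i for i, _ in pairs if i[feature] == v],
--                 [l for i, l in pairs if i[feature] == v]) for v in keys}
-- ===== Notes on version B (the rewrite author's own statement) =====
-- stated objective: alternative
-- what changed: Replaces A's single dict-accumulation pass (conditional insert + in-place appends) by first extracting the distinct feature values in first-appearance order and then building each bucket with a separate filtering pass per value.
import Mathlib
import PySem

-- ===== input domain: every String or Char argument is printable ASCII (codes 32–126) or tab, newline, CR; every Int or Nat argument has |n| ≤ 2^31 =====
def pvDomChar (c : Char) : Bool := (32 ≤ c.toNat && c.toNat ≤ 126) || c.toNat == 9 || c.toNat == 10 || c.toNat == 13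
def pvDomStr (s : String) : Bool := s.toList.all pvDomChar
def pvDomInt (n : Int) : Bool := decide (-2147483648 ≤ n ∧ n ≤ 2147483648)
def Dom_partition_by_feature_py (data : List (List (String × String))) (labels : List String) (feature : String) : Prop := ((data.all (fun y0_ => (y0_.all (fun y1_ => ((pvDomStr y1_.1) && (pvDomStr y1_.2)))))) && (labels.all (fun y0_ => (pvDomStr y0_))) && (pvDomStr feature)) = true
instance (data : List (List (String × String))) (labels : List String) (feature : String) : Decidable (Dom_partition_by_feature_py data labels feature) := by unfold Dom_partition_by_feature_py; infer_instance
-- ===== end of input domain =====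

-- B replaces A's single dict-accumulation pass by distinct-keys extraction followed by
-- one filtering pass per distinct feature value (objective: alternative, not faster).

-- ===== PORT A =====
-- instance[feature]: Python raises KeyError when the key is missing; Pre_ excludes that,
-- so the defaulted lookup `.getD ""` agrees with Python on every admitted input.
def pvFeatVal (feature : String) (p : List (String × String) × String) : String :=
  ((PySem.Dict.mk p.1).get? feature).getD ""

def partition_by_feature_py (data : List (List (String × String))) (labels : List String) (feature : String) : List (String × (List (List (String × String))) × List String) :=
  ((data.zip labels).foldl
    (fun d p =>
      let fv := pvFeatVal feature p
      let d := if d.contains fv then d else d.insert fv ([], [])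
      d.modify fv ([], []) (fun pr => (pr.1 ++ [p.1], pr.2 ++ [p.2])))
    PySem.Dict.empty).items

-- ===== PORT B =====
def partition_by_feature_py_alt (data : List (List (String × String))) (labels : List String) (feature : String) : List (String × (List (List (String × String))) × List String) :=
  let pairs := data.zip labels
  let keys := PySem.List.dedup (pairs.map (pvFeatVal feature))
  keys.map (fun v =>
    (v, ((pairs.filter (fun p => pvFeatVal feature p == v)).map (·.1),
         (pairs.filter (fun p => pvFeatVal feature p == v)).map (·.2))))

-- ===== PRECONDITION & SPEC =====
-- Pre_ excludes exactly the inputs on which Python A raises KeyError: some instance in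
-- zip(data, labels) lacking the feature key (B's Python raises KeyError there too).
def Pre_partition_by_feature_py (data : List (List (String × String))) (labels : List String) (feature : String) : Prop :=
  ∀ p ∈ data.zip labels, (PySem.Dict.mk p.1).contains feature = true
instance (data : List (List (String × String))) (labels : List String) (feature : String) : Decidable (Pre_partition_by_feature_py data labels feature) := by unfold Pre_partition_by_feature_py; infer_instance

def pvWitness_partition_by_feature_py : (List (List (String × String))) × List String × String :=
  ([[("f", "u"), ("g", "x")], [("f", "v")], [("f", "u")]], ["L", "M", "L"], "f")

def Spec_partition_by_feature_py (data : List (List (String × String))) (labels : List String) (feature : String) (out : List (String × (List (List (String × String))) × List String)) : Prop := out = partition_by_feature_py_alt data labels feature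
instance (data : List (List (String × String))) (labels : List String) (feature : String) (out : List (String × (List (List (String × String))) × List String)) : Decidable (Spec_partition_by_feature_py data labels feature out) := by unfold Spec_partition_by_feature_py; infer_instance

-- ===== CLAIM (what is proved, stated in full; the proofs are below) =====
def Claim_equal_partition_by_feature_py : Prop := ∀ (data : List (List (String × String))) (labels : List String) (feature : String), Dom_partition_by_feature_py data labels feature → Pre_partition_by_feature_py data labels feature → Spec_partition_by_feature_py data labels feature (partition_by_feature_py data labels feature)

-- ===== LEMMAS AND PROOFS =====

-- A's loop body, named for the proofs (definitionally the fold step of partition_by_feature_py).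
def pvStep (feature : String)
    (d : PySem.Dict String (List (List (String × String)) × List String))
    (p : List (String × String) × String) :
    PySem.Dict String (List (List (String × String)) × List String) :=
  let fv := pvFeatVal feature p
  let d := if d.contains fv then d else d.insert fv ([], [])
  d.modify fv ([], []) (fun pr => (pr.1 ++ [p.1], pr.2 ++ [p.2]))

lemma pvStep_getD (feature : String) (d : PySem.Dict String (List (List (String × String)) × List String))
    (p : List (String × String) × String) (k : String) :
    (pvStep feature d p).getD k ([], []) =
      if k = pvFeatVal feature p then
        ((d.getD (pvFeatVal feature p) ([], [])).1 ++ [p.1],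
         (d.getD (pvFeatVal feature p) ([], [])).2 ++ [p.2])
      else d.getD k ([], []) := by
  unfold pvStep
  set fv := pvFeatVal feature p with hfv
  by_cases hc : d.contains fv = true
  · simp [hc, PySem.Dict.getD_modify]
  · simp only [Bool.not_eq_true] at hc
    simp only [hc, Bool.false_eq_true, if_false, PySem.Dict.getD_modify,
      PySem.Dict.getD_insert, PySem.Dict.getD_of_not_contains d ([], ([] : List String)) hc]
    split_ifs <;> rfl

lemma pvStep_keys (feature : String) (d : PySem.Dict String (List (List (String × String)) × List String))
    (p : List (String × String) × String) :
    (pvStep feature d p).keys = PySem.Set.add d.keys (pvFeatVal feature p) := by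
  unfold pvStep PySem.Set.add
  set fv := pvFeatVal feature p with hfv
  have hsc : PySem.Set.contains d.keys fv = d.contains fv := by
    simp [PySem.Set.contains, PySem.Dict.contains_eq_decide_mem_keys]
  by_cases hc : d.contains fv = true
  · simp only [hc, if_true, hsc, PySem.Dict.keys_modify]
    exact PySem.Dict.keys_insert_of_contains d _ hc
  · simp only [Bool.not_eq_true] at hc
    simp only [hc, if_false, hsc, Bool.false_eq_true, PySem.Dict.keys_modify]
    rw [PySem.Dict.keys_insert_of_contains _ _ (by simp)]
    exact PySem.Dict.keys_insert_of_not_contains d _ hc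

lemma pvStep_nodup (feature : String) (d : PySem.Dict String (List (List (String × String)) × List String))
    (p : List (String × String) × String) (h : d.keys.Nodup) :
    (pvStep feature d p).keys.Nodup := by
  rw [pvStep_keys]
  unfold PySem.Set.add
  split_ifs with hc
  · exact h
  · refine List.Nodup.append h (List.nodup_singleton _) ?_
    intro a ha hb
    simp at hb; subst hb
    simp only [PySem.Set.contains, List.contains_eq_mem] at hc
    simp at hc; exact hc ha

lemma pvFold_getD (feature : String) (l : List (List (String × String) × String))
    (d : PySem.Dict String (List (List (String × String)) × List String)) (k : String) :
    (l.foldl (pvStep feature) d).getD k ([], []) =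
      ((d.getD k ([], [])).1 ++ (l.filter (fun p => pvFeatVal feature p == k)).map (·.1),
       (d.getD k ([], [])).2 ++ (l.filter (fun p => pvFeatVal feature p == k)).map (·.2)) := by
  induction l generalizing d with
  | nil => simp
  | cons p rest ih =>
    simp only [List.foldl_cons, List.filter_cons, ih, pvStep_getD]
    by_cases hk : pvFeatVal feature p = k
    · simp [hk]
    · have : ¬ (k = pvFeatVal feature p) := fun h => hk h.symm
      simp [hk, this]

lemma pvFold_keys (feature : String) (l : List (List (String × String) × String))
    (d : PySem.Dict String (List (List (String × String)) × List String)) :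
    (l.foldl (pvStep feature) d).keys = PySem.Set.update d.keys (l.map (pvFeatVal feature)) := by
  induction l generalizing d with
  | nil => simp [PySem.Set.update_nil]
  | cons p rest ih =>
    simp only [List.foldl_cons, List.map_cons, PySem.Set.update_cons, ih, pvStep_keys]

lemma pvFold_nodup (feature : String) (l : List (List (String × String) × String))
    (d : PySem.Dict String (List (List (String × String)) × List String)) (h : d.keys.Nodup) :
    (l.foldl (pvStep feature) d).keys.Nodup := by
  induction l generalizing d with
  | nil => exact h
  | cons p rest ih => exact ih _ (pvStep_nodup _ _ _ h)

theorem partition_by_feature_py_spec : Claim_equal_partition_by_feature_py := by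
  intro data labels feature _ _
  unfold Spec_partition_by_feature_py partition_by_feature_py partition_by_feature_py_alt
  have hstep : (fun d p =>
      let fv := pvFeatVal feature p
      let d := if d.contains fv then d else d.insert fv ([], [])
      d.modify fv ([], []) (fun pr => (pr.1 ++ [p.1], pr.2 ++ [p.2]))) = pvStep feature := rfl
  rw [hstep]
  set l := data.zip labels with hl
  have hnd : ((l.foldl (pvStep feature) PySem.Dict.empty)).keys.Nodup :=
    pvFold_nodup feature l _ (by simp)
  rw [PySem.Dict.items_eq_map_keys _ hnd (([], []) : List (List (String × String)) × List String)]
  rw [pvFold_keys]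
  rw [show (PySem.Dict.empty : PySem.Dict String (List (List (String × String)) × List String)).keys = ([] : List String) from rfl]
  rw [PySem.Set.update_nil_left]
  simp only [PySem.List.dedup_eq_ofList]
  apply List.map_congr_left
  intro k _
  rw [pvFold_getD]
  simp
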